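-- pv_equiv track=rewrite | github.com/Yishak123-sol/COMPETITIVE-PROGRAMMING-A2SV | A2SV_python_track\/Queens That Can Attack the King.py | queensAttacktheKing
-- ===== SOURCE A (Python) =====
-- from typing import List
--
-- def is_inboard(row, column):
--
--     if row < 0 or row > 7 or column > 7 or column < 0:
--         return False
--
--     return True
--
-- def is_queen(row, column, queens):
--
--     for queen in queens:
--
--         if queen == [row, column]:
--             return True
--
--     return False
--
-- def queensAttacktheKing(queens: List[List[int]], king: List[int]) -> List[List[int]]:
--
--     position = [(0, 1), (0, -1), (-1, 0), (1, 0), (-1, -1), (-1, 1), (1, -1), (1, 1)]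
--     cordinate = []
--
--     for index in range(8):
--
--         row = king[0]
--         column = king[1]
--
--         while is_inboard(row, column):
--
--             if is_queen(row, column, queens):
--                 cordinate.append([row, column])
--
--                 break
--
--             row += position[index][0]
--             column += position[index][1]
--
--
--     return cordinate
-- ===== SOURCE B (Python) =====
-- from typing import List
--
-- def queensAttacktheKing(queens: List[List[int]], king: List[int]) -> List[List[int]]:
--     kr, kc = king[0], king[1]
--     if not (0 <= kr <= 7 and 0 <= kc <= 7):
--         return []
--     best = {}
--     for q in queens:
--         if len(q) != 2:
--             continue  # malformed entries can never occupy a board square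
--         qr, qc = q
--         if not (0 <= qr <= 7 and 0 <= qc <= 7):
--             continue
--         dr, dc = qr - kr, qc - kc
--         if dr != 0 and dc != 0 and abs(dr) != abs(dc):
--             continue  # not on a rank, file or diagonal through the king
--         key = ((dr > 0) - (dr < 0), (dc > 0) - (dc < 0))
--         dist = max(abs(dr), abs(dc))
--         if key not in best or dist < best[key][0]:
--             best[key] = (dist, [qr, qc])
--     dirs = [(0, 1), (0, -1), (-1, 0), (1, 0), (-1, -1), (-1, 1), (1, -1), (1, 1)]
--     return [best[d][1] for d in dirs if d in best]
-- ===== Notes on version B (the rewrite author's own statement) =====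
-- stated objective: alternative
-- what changed: A walks up to 8 cells along each of the 8 rays from the king and rescans the queen list at every visited cell; B makes one pass over the queens, classifying each by the sign of its offset from the king and keeping, per direction, the closest on-ray queen in a dict, then reads the dict off in A's fixed direction order.
import Mathlib
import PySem

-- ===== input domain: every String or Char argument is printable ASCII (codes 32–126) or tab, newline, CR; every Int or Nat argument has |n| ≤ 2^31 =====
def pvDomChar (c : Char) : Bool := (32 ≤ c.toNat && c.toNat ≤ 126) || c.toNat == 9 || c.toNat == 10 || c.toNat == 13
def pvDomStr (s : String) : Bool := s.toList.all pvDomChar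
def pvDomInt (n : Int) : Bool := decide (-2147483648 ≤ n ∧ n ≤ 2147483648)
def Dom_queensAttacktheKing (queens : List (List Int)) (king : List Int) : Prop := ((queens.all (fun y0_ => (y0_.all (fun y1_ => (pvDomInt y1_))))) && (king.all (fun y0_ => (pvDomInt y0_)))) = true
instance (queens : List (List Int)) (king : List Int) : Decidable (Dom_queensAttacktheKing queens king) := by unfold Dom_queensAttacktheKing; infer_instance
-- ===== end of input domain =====

-- B replaces A's 64 ray-walk cell probes (each scanning the queen list) by a single pass over the
-- queens keeping, per direction, the closest on-ray queen in a dict (objective: alternative algorithm).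

-- ===== PORT A =====
def pvIsInboard (row column : Int) : Bool :=
  if row < 0 ∨ row > 7 ∨ column > 7 ∨ column < 0 then false else true

def pvIsQueen (row column : Int) (queens : List (List Int)) : Bool :=
  queens.any (fun queen => queen == [row, column])

-- the while-loop of A; the walk provably leaves the 8×8 board within 9 steps, so fuel 16 is never exhausted
def pvWalkA (queens : List (List Int)) (dr dc : Int) :
    Nat → Int → Int → List (List Int) → List (List Int)
  | 0, _, _, cordinate => cordinate
  | fuel + 1, row, column, cordinate =>
    if pvIsInboard row column then
      if pvIsQueen row column queens then cordinate ++ [[row, column]]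
      else pvWalkA queens dr dc fuel (row + dr) (column + dc) cordinate
    else cordinate

def queensAttacktheKing (queens : List (List Int)) (king : List Int) : List (List Int) :=
  match PySem.List.pyGet? king 0, PySem.List.pyGet? king 1 with
  | some kr, some kc =>
    let position : List (Int × Int) :=
      [(0,1), (0,-1), (-1,0), (1,0), (-1,-1), (-1,1), (1,-1), (1,1)]
    position.foldl (fun cordinate p => pvWalkA queens p.1 p.2 16 kr kc cordinate) []
  | _, _ => []  -- king[0] / king[1] raises IndexError: outside Pre_

-- ===== PORT B =====
-- (dr > 0) - (dr < 0)
def pvSign (x : Int) : Int := (if 0 < x then 1 else 0) - (if x < 0 then 1 else 0)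

-- the body of B's single for-loop over the queens
def pvStepB (kr kc : Int) (best : PySem.Dict (Int × Int) (Int × List Int)) (q : List Int) :
    PySem.Dict (Int × Int) (Int × List Int) :=
  match q with
  | [qr, qc] =>
    if qr < 0 ∨ qr > 7 ∨ qc < 0 ∨ qc > 7 then best
    else
      let dr := qr - kr
      let dc := qc - kc
      if dr ≠ 0 ∧ dc ≠ 0 ∧ |dr| ≠ |dc| then best
      else
        let key := (pvSign dr, pvSign dc)
        let dist := max |dr| |dc|
        match best.get? key with
        | none => best.insert key (dist, [qr, qc])
        | some v => if dist < v.1 then best.insert key (dist, [qr, qc]) else best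
  | _ => best  -- len(q) != 2: continue

def queensAttacktheKing_alt (queens : List (List Int)) (king : List Int) : List (List Int) :=
  match PySem.List.pyGet? king 0 with
  | none => []  -- king[0] raises IndexError: outside Pre_
  | some kr =>
    match PySem.List.pyGet? king 1 with
    | none => []  -- king[1] raises IndexError: outside Pre_
    | some kc =>
      if kr < 0 ∨ kr > 7 ∨ kc < 0 ∨ kc > 7 then []
      else
        let best := queens.foldl (pvStepB kr kc) PySem.Dict.empty
        let dirs : List (Int × Int) :=
          [(0,1), (0,-1), (-1,0), (1,0), (-1,-1), (-1,1), (1,-1), (1,1)]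
        dirs.filterMap (fun d => (best.get? d).map (·.2))

-- ===== PRECONDITION & SPEC =====
-- Pre_ excludes kings with fewer than two coordinates (A raises IndexError on king[1]) and inputs
-- where a queen occupies the king's own square — an invalid chess position on which A's answer
-- (that queen repeated once per each of the 8 directions) is as accidental as any other.
def Pre_queensAttacktheKing (queens : List (List Int)) (king : List Int) : Prop :=
  2 ≤ king.length ∧ king.take 2 ∉ queens

instance (queens : List (List Int)) (king : List Int) : Decidable (Pre_queensAttacktheKing queens king) := by
  unfold Pre_queensAttacktheKing; infer_instance

def pvWitness_queensAttacktheKing : List (List Int) × List Int := ([[0, 3], [5, 5]], [0, 0])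

def Spec_queensAttacktheKing (queens : List (List Int)) (king : List Int) (out : List (List Int)) : Prop := out = queensAttacktheKing_alt queens king
instance (queens : List (List Int)) (king : List Int) (out : List (List Int)) : Decidable (Spec_queensAttacktheKing queens king out) := by unfold Spec_queensAttacktheKing; infer_instance

-- ===== CLAIM (what is proved, stated in full; the proofs are below) =====
def Claim_equal_queensAttacktheKing : Prop := ∀ (queens : List (List Int)) (king : List Int), Dom_queensAttacktheKing queens king → Pre_queensAttacktheKing queens king → Spec_queensAttacktheKing queens king (queensAttacktheKing queens king)

-- ===== LEMMAS AND PROOFS =====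

-- cell t of the ray from (kr,kc) in direction (dr,dc) is an in-board queen
def pvHit (queens : List (List Int)) (kr kc dr dc : Int) (t : Nat) : Prop :=
  pvIsInboard (kr + t * dr) (kc + t * dc) = true ∧ [kr + t * dr, kc + t * dc] ∈ queens

lemma pvIsInboard_iff (r c : Int) :
    pvIsInboard r c = true ↔ 0 ≤ r ∧ r ≤ 7 ∧ 0 ≤ c ∧ c ≤ 7 := by
  simp [pvIsInboard]; omega

lemma pvIsQueen_iff (r c : Int) (queens : List (List Int)) :
    pvIsQueen r c queens = true ↔ [r, c] ∈ queens := by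
  simp [pvIsQueen]

-- the per-queen candidate for one fixed direction key d (mirrors the filters of pvStepB)
def pvQual (kr kc : Int) (d : Int × Int) (q : List Int) : Option (Int × List Int) :=
  match q with
  | [qr, qc] =>
    if qr < 0 ∨ qr > 7 ∨ qc < 0 ∨ qc > 7 then none
    else
      let dr := qr - kr
      let dc := qc - kc
      if dr ≠ 0 ∧ dc ≠ 0 ∧ |dr| ≠ |dc| then none
      else if (pvSign dr, pvSign dc) = d then some (max |dr| |dc|, [qr, qc]) else none
  | _ => none

def pvMerge (o c : Option (Int × List Int)) : Option (Int × List Int) :=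
  match c with
  | none => o
  | some c => match o with
    | none => some c
    | some v => if c.1 < v.1 then some c else some v

lemma pvStepB_get (kr kc : Int) (best : PySem.Dict (Int × Int) (Int × List Int))
    (q : List Int) (d : Int × Int) :
    (pvStepB kr kc best q).get? d = pvMerge (best.get? d) (pvQual kr kc d q) := by
  rcases q with _ | ⟨qr, q⟩
  · rfl
  rcases q with _ | ⟨qc, q⟩
  · rfl
  rcases q with _ | ⟨x, q⟩
  swap
  · rfl
  simp only [pvStepB, pvQual]
  by_cases hob : qr < 0 ∨ qr > 7 ∨ qc < 0 ∨ qc > 7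
  · simp [hob, pvMerge]
  rw [if_neg hob, if_neg hob]
  by_cases hray : qr - kr ≠ 0 ∧ qc - kc ≠ 0 ∧ |qr - kr| ≠ |qc - kc|
  · simp [hray, pvMerge]
  rw [if_neg hray, if_neg hray]
  by_cases hd : (pvSign (qr - kr), pvSign (qc - kc)) = d
  · rw [if_pos hd]
    subst hd
    cases hbg : best.get? (pvSign (qr - kr), pvSign (qc - kc)) with
    | none => simp [pvMerge, PySem.Dict.get?_insert_self]
    | some v =>
      by_cases hlt : max |qr - kr| |qc - kc| < v.1
      · simp [pvMerge, hlt, PySem.Dict.get?_insert_self]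
      · simp [pvMerge, hbg, hlt]
  · rw [if_neg hd]
    have hd' : d ≠ (pvSign (qr - kr), pvSign (qc - kc)) := fun h => hd h.symm
    cases hbg : best.get? (pvSign (qr - kr), pvSign (qc - kc)) with
    | none => rw [PySem.Dict.get?_insert_of_ne _ _ hd']; simp [pvMerge]
    | some v =>
      by_cases hlt : max |qr - kr| |qc - kc| < v.1
      · simp [pvMerge, hlt, PySem.Dict.get?_insert_of_ne _ _ hd']
      · simp [pvMerge, hlt]

lemma pvFoldB_get (kr kc : Int) (d : Int × Int) :
    ∀ (qs : List (List Int)) (best : PySem.Dict (Int × Int) (Int × List Int)),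
    (qs.foldl (pvStepB kr kc) best).get? d =
      qs.foldl (fun o q => pvMerge o (pvQual kr kc d q)) (best.get? d) := by
  intro qs
  induction qs with
  | nil => intro best; rfl
  | cons q qs ih => intro best; simp only [List.foldl_cons, ih, pvStepB_get]

-- the bridge: a queen qualifies for direction (dr,dc) iff it sits at ray cell t ≥ 1
lemma pvQual_eq_some_iff (kr kc dr dc : Int)
    (hdr : dr = -1 ∨ dr = 0 ∨ dr = 1) (hdc : dc = -1 ∨ dc = 0 ∨ dc = 1)
    (hne : ¬(dr = 0 ∧ dc = 0)) (q : List Int) (c : Int × List Int) :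
    pvQual kr kc (dr, dc) q = some c ↔
      ∃ t : Nat, 1 ≤ t ∧ q = [kr + t * dr, kc + t * dc] ∧
        pvIsInboard (kr + t * dr) (kc + t * dc) = true ∧
        c = ((t : Int), [kr + t * dr, kc + t * dc]) := by
  rcases q with _ | ⟨qr, q⟩
  · simp [pvQual]
  rcases q with _ | ⟨qc, q⟩
  · simp [pvQual]
  rcases q with _ | ⟨x, q⟩
  swap
  · simp [pvQual]
  simp only [pvQual]
  constructor
  · intro h
    by_cases hob : qr < 0 ∨ qr > 7 ∨ qc < 0 ∨ qc > 7
    · rw [if_pos hob] at h; exact absurd h (by simp)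
    rw [if_neg hob] at h
    by_cases hray : qr - kr ≠ 0 ∧ qc - kc ≠ 0 ∧ |qr - kr| ≠ |qc - kc|
    · rw [if_pos hray] at h; exact absurd h (by simp)
    rw [if_neg hray] at h
    by_cases hkey : (pvSign (qr - kr), pvSign (qc - kc)) = (dr, dc)
    swap
    · rw [if_neg hkey] at h; exact absurd h (by simp)
    rw [if_pos hkey] at h
    have h1 := congrArg Prod.fst hkey
    have h2 := congrArg Prod.snd hkey
    simp only [pvSign] at h1 h2
    have hc := Option.some.inj h
    have hr : (dr = 1 ∧ 0 < qr - kr) ∨ (dr = 0 ∧ qr - kr = 0) ∨ (dr = -1 ∧ qr - kr < 0) := by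
      split_ifs at h1 <;> omega
    have hcc : (dc = 1 ∧ 0 < qc - kc) ∨ (dc = 0 ∧ qc - kc = 0) ∨ (dc = -1 ∧ qc - kc < 0) := by
      split_ifs at h2 <;> omega
    rw [Int.abs_eq_natAbs, Int.abs_eq_natAbs] at hray hc
    refine ⟨max (qr - kr).natAbs (qc - kc).natAbs, ?_, ?_, ?_, ?_⟩
    · rcases hr with ⟨_, _⟩ | ⟨_, _⟩ | ⟨_, _⟩ <;> rcases hcc with ⟨_, _⟩ | ⟨_, _⟩ | ⟨_, _⟩ <;> omega
    · rcases hr with ⟨rfl, _⟩ | ⟨rfl, _⟩ | ⟨rfl, _⟩ <;> rcases hcc with ⟨rfl, _⟩ | ⟨rfl, _⟩ | ⟨rfl, _⟩ <;>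
        (simp only [List.cons.injEq, and_true]; constructor <;> omega)
    · rw [pvIsInboard_iff]
      rcases hr with ⟨rfl, _⟩ | ⟨rfl, _⟩ | ⟨rfl, _⟩ <;> rcases hcc with ⟨rfl, _⟩ | ⟨rfl, _⟩ | ⟨rfl, _⟩ <;> omega
    · rw [← hc]
      rcases hr with ⟨rfl, _⟩ | ⟨rfl, _⟩ | ⟨rfl, _⟩ <;> rcases hcc with ⟨rfl, _⟩ | ⟨rfl, _⟩ | ⟨rfl, _⟩ <;>
        (simp only [Prod.mk.injEq, List.cons.injEq, and_true]; refine ⟨by omega, by omega, by omega⟩)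
  · rintro ⟨t, ht1, heq, hin, hceq⟩
    rw [pvIsInboard_iff] at hin
    simp only [List.cons.injEq, and_true] at heq
    obtain ⟨e1, e2⟩ := heq
    rcases hdr with rfl | rfl | rfl <;> rcases hdc with rfl | rfl | rfl
    all_goals first
      | exact absurd ⟨rfl, rfl⟩ hne
      | (rw [if_neg (by omega : ¬(qr < 0 ∨ qr > 7 ∨ qc < 0 ∨ qc > 7)),
             if_neg (by rw [Int.abs_eq_natAbs, Int.abs_eq_natAbs]; omega :
               ¬(qr - kr ≠ 0 ∧ qc - kc ≠ 0 ∧ |qr - kr| ≠ |qc - kc|)),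
             if_pos (by simp only [pvSign, Prod.mk.injEq]; constructor <;> (split_ifs <;> omega))]
         rw [hceq]
         simp only [Prod.mk.injEq, List.cons.injEq, and_true, Option.some.injEq]
         rw [Int.abs_eq_natAbs, Int.abs_eq_natAbs]
         refine ⟨by omega, by omega, by omega⟩)

-- A's walk when no ray cell holds a queen: the accumulator is returned unchanged
lemma pvWalkA_misses (queens : List (List Int)) (kr kc dr dc : Int)
    (h : ∀ t : Nat, ¬ pvHit queens kr kc dr dc t) :
    ∀ (f s : Nat) (acc : List (List Int)),
      pvWalkA queens dr dc f (kr + s * dr) (kc + s * dc) acc = acc := by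
  intro f
  induction f with
  | zero => intro s acc; rfl
  | succ f ih =>
    intro s acc
    rw [pvWalkA]
    by_cases hin : pvIsInboard (kr + s * dr) (kc + s * dc) = true
    · rw [if_pos hin]
      have hq : pvIsQueen (kr + s * dr) (kc + s * dc) queens = false := by
        rw [Bool.eq_false_iff, Ne, pvIsQueen_iff]
        exact fun hm => h s ⟨hin, hm⟩
      rw [hq]
      simp only [Bool.false_eq_true, if_false]
      have e1 : kr + s * dr + dr = kr + ((s + 1 : Nat) : Int) * dr := by push_cast; ring
      have e2 : kc + s * dc + dc = kc + ((s + 1 : Nat) : Int) * dc := by push_cast; ring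
      rw [e1, e2]
      exact ih (s + 1) acc
    · rw [if_neg hin]

-- A's walk finds the first ray cell holding a queen
lemma pvWalkA_finds (queens : List (List Int)) (kr kc dr dc : Int) (n : Nat)
    (hb : pvIsInboard kr kc = true)
    (hdr : dr = -1 ∨ dr = 0 ∨ dr = 1) (hdc : dc = -1 ∨ dc = 0 ∨ dc = 1)
    (hn : pvHit queens kr kc dr dc n) (hmin : ∀ m : Nat, m < n → ¬ pvHit queens kr kc dr dc m) :
    ∀ (f s : Nat) (acc : List (List Int)), s ≤ n → n < s + f →
      pvWalkA queens dr dc f (kr + s * dr) (kc + s * dc) acc =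
        acc ++ [[kr + n * dr, kc + n * dc]] := by
  intro f
  induction f with
  | zero => intro s acc hs hf; omega
  | succ f ih =>
    intro s acc hs hf
    have hin : pvIsInboard (kr + s * dr) (kc + s * dc) = true := by
      have hni := hn.1
      rw [pvIsInboard_iff] at hb hni ⊢
      have hsn : (s : Int) ≤ (n : Int) := by exact_mod_cast hs
      rcases hdr with rfl | rfl | rfl <;> rcases hdc with rfl | rfl | rfl <;> omega
    rw [pvWalkA, if_pos hin]
    rcases Nat.lt_or_ge s n with hlt | hge
    · have hq : pvIsQueen (kr + s * dr) (kc + s * dc) queens = false := by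
        rw [Bool.eq_false_iff, Ne, pvIsQueen_iff]
        exact fun hm => hmin s hlt ⟨hin, hm⟩
      rw [hq]
      simp only [Bool.false_eq_true, if_false]
      have e1 : kr + s * dr + dr = kr + ((s + 1 : Nat) : Int) * dr := by push_cast; ring
      have e2 : kc + s * dc + dc = kc + ((s + 1 : Nat) : Int) * dc := by push_cast; ring
      rw [e1, e2]
      exact ih (s + 1) acc (by omega) (by omega)
    · have hsn : s = n := le_antisymm hs hge
      subst hsn
      rw [(pvIsQueen_iff _ _ _).mpr hn.2]
      simp

-- B's min-fold, empty case
lemma pvFoldMerge_none (kr kc : Int) (d : Int × Int) (qs : List (List Int))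
    (h : ∀ q ∈ qs, pvQual kr kc d q = none) :
    qs.foldl (fun o q => pvMerge o (pvQual kr kc d q)) none = none := by
  induction qs with
  | nil => rfl
  | cons q qs ih =>
    rw [List.foldl_cons, h q (by simp)]
    exact ih (fun p hp => h p (by simp [hp]))

-- invariant of B's min-fold: the accumulator is none or the closest in-board on-ray queen seen so far
lemma pvFoldMerge_aux (queens : List (List Int)) (kr kc dr dc : Int) (n : Nat)
    (hdr : dr = -1 ∨ dr = 0 ∨ dr = 1) (hdc : dc = -1 ∨ dc = 0 ∨ dc = 1)
    (hne : ¬(dr = 0 ∧ dc = 0)) (hn1 : 1 ≤ n)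
    (hn : pvHit queens kr kc dr dc n)
    (hmin : ∀ m : Nat, m < n → ¬ pvHit queens kr kc dr dc m) :
    ∀ (qs : List (List Int)) (o : Option (Int × List Int)),
      (∀ q ∈ qs, q ∈ queens) →
      (o = none ∨ ∃ t : Nat, 1 ≤ t ∧ pvHit queens kr kc dr dc t ∧
        o = some ((t : Int), [kr + t * dr, kc + t * dc])) →
      ([kr + n * dr, kc + n * dc] ∈ qs ∨ o = some ((n : Int), [kr + n * dr, kc + n * dc])) →
      qs.foldl (fun o q => pvMerge o (pvQual kr kc (dr, dc) q)) o =
        some ((n : Int), [kr + n * dr, kc + n * dc]) := by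
  intro qs
  induction qs with
  | nil =>
    intro o _ _ h3
    rcases h3 with h3 | h3
    · simp at h3
    · simpa using h3
  | cons q qs ih =>
    intro o hsub hinv h3
    have hq : q ∈ queens := hsub q (by simp)
    have hcfact : pvQual kr kc (dr, dc) q = none ∨ ∃ t : Nat, 1 ≤ t ∧
        pvHit queens kr kc dr dc t ∧
        pvQual kr kc (dr, dc) q = some ((t : Int), [kr + t * dr, kc + t * dc]) := by
      cases hc : pvQual kr kc (dr, dc) q with
      | none => exact Or.inl rfl
      | some c =>
        obtain ⟨t, ht1, hqe, hin, hce⟩ := (pvQual_eq_some_iff kr kc dr dc hdr hdc hne q c).mp hc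
        exact Or.inr ⟨t, ht1, ⟨hin, hqe ▸ hq⟩, by rw [hce]⟩
    have hge : ∀ t : Nat, pvHit queens kr kc dr dc t → n ≤ t := by
      intro t ht
      by_contra hlt
      exact hmin t (by omega) ht
    rw [List.foldl_cons]
    have hinv' : pvMerge o (pvQual kr kc (dr, dc) q) = none ∨ ∃ t : Nat, 1 ≤ t ∧
        pvHit queens kr kc dr dc t ∧
        pvMerge o (pvQual kr kc (dr, dc) q) = some ((t : Int), [kr + t * dr, kc + t * dc]) := by
      rcases hcfact with hc | ⟨t, ht1, ht, hc⟩ <;> rw [hc]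
      · exact hinv
      · rcases hinv with rfl | ⟨u, hu1, hu, rfl⟩
        · exact Or.inr ⟨t, ht1, ht, rfl⟩
        · simp only [pvMerge]
          by_cases hlt : (t : Int) < (u : Int)
          · rw [if_pos hlt]; exact Or.inr ⟨t, ht1, ht, rfl⟩
          · rw [if_neg hlt]; exact Or.inr ⟨u, hu1, hu, rfl⟩
    have h3' : [kr + n * dr, kc + n * dc] ∈ qs ∨
        pvMerge o (pvQual kr kc (dr, dc) q) = some ((n : Int), [kr + n * dr, kc + n * dc]) := by
      rcases h3 with h3 | h3
      · rcases List.mem_cons.mp h3 with hqn | hmem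
        · right
          have hcq : pvQual kr kc (dr, dc) q = some ((n : Int), [kr + n * dr, kc + n * dc]) := by
            subst hqn
            exact (pvQual_eq_some_iff kr kc dr dc hdr hdc hne _ _).mpr ⟨n, hn1, rfl, hn.1, rfl⟩
          rw [hcq]
          rcases hinv with rfl | ⟨u, hu1, hu, rfl⟩
          · rfl
          · have hnu := hge u hu
            simp only [pvMerge]
            by_cases hlt : (n : Int) < (u : Int)
            · rw [if_pos hlt]
            · have hun : u = n := by omega
              subst hun
              rw [if_neg hlt]
        · exact Or.inl hmem
      · right
        rcases hcfact with hc | ⟨t, ht1, ht, hc⟩ <;> rw [h3, hc]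
        · rfl
        · have hnt := hge t ht
          simp only [pvMerge]
          rw [if_neg (by omega : ¬((t : Int), [kr + t * dr, kc + t * dc]).1 < ((n : Int), [kr + n * dr, kc + n * dc]).1)]
    exact ih _ (fun p hp => hsub p (by simp [hp])) hinv' h3'

-- B's min-fold finds exactly the first ray cell holding a queen
lemma pvFoldMerge_finds (queens : List (List Int)) (kr kc dr dc : Int) (n : Nat)
    (hdr : dr = -1 ∨ dr = 0 ∨ dr = 1) (hdc : dc = -1 ∨ dc = 0 ∨ dc = 1)
    (hne : ¬(dr = 0 ∧ dc = 0)) (hn1 : 1 ≤ n)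
    (hn : pvHit queens kr kc dr dc n) (hmin : ∀ m : Nat, m < n → ¬ pvHit queens kr kc dr dc m) :
    queens.foldl (fun o q => pvMerge o (pvQual kr kc (dr, dc) q)) none =
      some ((n : Int), [kr + n * dr, kc + n * dc]) := by
  exact pvFoldMerge_aux queens kr kc dr dc n hdr hdc hne hn1 hn hmin queens none
    (fun q hq => hq) (Or.inl rfl) (Or.inl hn.2)

-- one direction: A's walk appends exactly B's dict entry for that direction
lemma pvDirPiece (queens : List (List Int)) (kr kc dr dc : Int)
    (hb : pvIsInboard kr kc = true) (hk : [kr, kc] ∉ queens)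
    (hdr : dr = -1 ∨ dr = 0 ∨ dr = 1) (hdc : dc = -1 ∨ dc = 0 ∨ dc = 1)
    (hne : ¬(dr = 0 ∧ dc = 0)) (acc : List (List Int)) :
    pvWalkA queens dr dc 16 kr kc acc =
      acc ++ (((queens.foldl (pvStepB kr kc) PySem.Dict.empty).get? (dr, dc)).map (·.2)).toList := by
  have hempty : (PySem.Dict.empty (κ := Int × Int) (ν := Int × List Int)).get? (dr, dc) = none := by
    simp
  rw [pvFoldB_get, hempty]
  haveI : DecidablePred (pvHit queens kr kc dr dc) := fun t => by unfold pvHit; infer_instance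
  have e1 : kr = kr + ((0 : Nat) : Int) * dr := by simp
  have e2 : kc = kc + ((0 : Nat) : Int) * dc := by simp
  by_cases hex : ∃ t : Nat, pvHit queens kr kc dr dc t
  · have hn := Nat.find_spec hex
    have hmin : ∀ m : Nat, m < Nat.find hex → ¬ pvHit queens kr kc dr dc m :=
      fun m hm => Nat.find_min hex hm
    have h0 : ¬ pvHit queens kr kc dr dc 0 := by
      intro h0
      apply hk
      simpa using h0.2
    have hn1 : 1 ≤ Nat.find hex := by
      rcases Nat.eq_zero_or_pos (Nat.find hex) with h | h
      · exact absurd (h ▸ hn) h0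
      · exact h
    rw [pvFoldMerge_finds queens kr kc dr dc (Nat.find hex) hdr hdc hne hn1 hn hmin]
    have hn16 : Nat.find hex < 16 := by
      have hni := hn.1
      rw [pvIsInboard_iff] at hb hni
      rcases hdr with rfl | rfl | rfl <;> rcases hdc with rfl | rfl | rfl <;> omega
    calc pvWalkA queens dr dc 16 kr kc acc
        = pvWalkA queens dr dc 16 (kr + ((0 : Nat) : Int) * dr) (kc + ((0 : Nat) : Int) * dc) acc := by
          rw [← e1, ← e2]
      _ = acc ++ [[kr + (Nat.find hex) * dr, kc + (Nat.find hex) * dc]] :=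
          pvWalkA_finds queens kr kc dr dc (Nat.find hex) hb hdr hdc hn hmin 16 0 acc
            (by omega) (by omega)
      _ = _ := by simp
  · simp only [not_exists] at hex
    have hall : ∀ q ∈ queens, pvQual kr kc (dr, dc) q = none := by
      intro q hq
      cases hc : pvQual kr kc (dr, dc) q with
      | none => rfl
      | some c =>
        obtain ⟨t, ht1, hqe, hin, hce⟩ := (pvQual_eq_some_iff kr kc dr dc hdr hdc hne q c).mp hc
        exact absurd ⟨hin, hqe ▸ hq⟩ (hex t)
    rw [pvFoldMerge_none kr kc (dr, dc) queens hall]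
    calc pvWalkA queens dr dc 16 kr kc acc
        = pvWalkA queens dr dc 16 (kr + ((0 : Nat) : Int) * dr) (kc + ((0 : Nat) : Int) * dc) acc := by
          rw [← e1, ← e2]
      _ = acc := pvWalkA_misses queens kr kc dr dc hex 16 0 acc
      _ = _ := by simp

lemma pvFoldWalk (queens : List (List Int)) (kr kc : Int)
    (F : Int × Int → Option (List Int)) :
    ∀ (ds : List (Int × Int)) (acc : List (List Int)),
      (∀ d ∈ ds, ∀ a, pvWalkA queens d.1 d.2 16 kr kc a = a ++ (F d).toList) →
      ds.foldl (fun a d => pvWalkA queens d.1 d.2 16 kr kc a) acc = acc ++ ds.filterMap F := by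
  intro ds
  induction ds with
  | nil => intro acc _; simp
  | cons d ds ih =>
    intro acc h
    rw [List.foldl_cons, h d (by simp), ih _ (fun p hp a => h p (by simp [hp]) a),
      List.filterMap_cons]
    cases F d <;> simp

-- ===== VERDICT (by name: the statement is the Claim_ definition above) =====
theorem queensAttacktheKing_spec : Claim_equal_queensAttacktheKing := by
  intro queens king hdom hpre
  obtain ⟨hlen, hnk⟩ := hpre
  rcases king with _ | ⟨k0, king⟩
  · simp at hlen
  rcases king with _ | ⟨k1, king⟩
  · simp at hlen
  simp only [List.take_succ_cons, List.take_zero] at hnk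
  unfold Spec_queensAttacktheKing
  have hg0 : PySem.List.pyGet? (k0 :: k1 :: king) (0 : Int) = some k0 := by simp
  have hg1 : PySem.List.pyGet? (k0 :: k1 :: king) (1 : Int) = some k1 := by simp
  simp only [queensAttacktheKing, queensAttacktheKing_alt, hg0, hg1]
  by_cases hb : pvIsInboard k0 k1 = true
  · have hnotg : ¬(k0 < 0 ∨ k0 > 7 ∨ k1 < 0 ∨ k1 > 7) := by
      rw [pvIsInboard_iff] at hb; omega
    rw [if_neg hnotg]
    refine (pvFoldWalk queens k0 k1 _ _ [] ?_).trans (List.nil_append _)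
    intro d hd a
    fin_cases hd <;>
      exact pvDirPiece queens k0 k1 _ _ hb hnk (by decide) (by decide) (by decide) a
  · have hb' : pvIsInboard k0 k1 = false := by
      rwa [Bool.not_eq_true] at hb
    have hg : k0 < 0 ∨ k0 > 7 ∨ k1 < 0 ∨ k1 > 7 := by
      have hiff := pvIsInboard_iff k0 k1
      rw [hb'] at hiff
      simp at hiff
      omega
    rw [if_pos hg]
    have hw : ∀ dr dc : Int, ∀ a : List (List Int), pvWalkA queens dr dc 16 k0 k1 a = a := by
      intro dr dc a
      rw [pvWalkA]
      simp [hb']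
    simp [List.foldl, hw]
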